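-- pv_equiv track=rewrite | github.com/SRD2705/Codeforces-Python | Codeforces Python solutions/1490C - Sum of Cubes.py | cubesum
-- ===== SOURCE A (Python) =====
-- def cubesum(n):
--     s = dict()
--     for i in range(1,n+1):
--         if i * i * i > n:
--             break
--         s[i * i * i] = 1
--         if (n - i * i * i) in s.keys():
--             return True
--
--     return False
-- ===== SOURCE B (Python) =====
-- def cubesum(n):
--     # integer cube root: largest b >= 0 with b**3 <= n (0 when n < 1)
--     b = 0
--     while (b + 1) ** 3 <= n:
--         b += 1
--     a = 1
--     while a <= b:
--         t = a * a * a + b * b * b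
--         if t == n:
--             return True
--         if t < n:
--             a += 1
--         else:
--             b -= 1
--     return False
-- ===== Notes on version B (the rewrite author's own statement) =====
-- stated objective: alternative
-- what changed: Replaces the upward scan with a hash set of cubes by an integer cube root followed by a two-pointer convergence from both ends of the candidate range, maintaining no dictionary.
import Mathlib
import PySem

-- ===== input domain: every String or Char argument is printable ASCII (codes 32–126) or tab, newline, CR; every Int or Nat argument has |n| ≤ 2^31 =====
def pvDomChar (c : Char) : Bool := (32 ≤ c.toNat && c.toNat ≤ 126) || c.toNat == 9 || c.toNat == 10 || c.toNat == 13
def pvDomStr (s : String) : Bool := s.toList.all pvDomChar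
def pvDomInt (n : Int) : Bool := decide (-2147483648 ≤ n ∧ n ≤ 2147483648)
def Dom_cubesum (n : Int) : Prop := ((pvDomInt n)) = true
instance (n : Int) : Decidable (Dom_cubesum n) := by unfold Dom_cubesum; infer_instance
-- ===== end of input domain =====

-- B replaces A's upward scan with a hash set of cubes by an integer cube root plus a
-- two-pointer convergence, maintaining no dictionary (objective: alternative algorithm).

-- ===== PORT A =====
-- the for-loop over range(1, n+1) with break / early return, carrying the dict s;
-- the range is consumed lazily (i counts up, the fuel is the range's length n.toNat)
def cubesumLoop (n : Int) : Nat → Int → PySem.Dict Int Int → Bool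
  | 0, _, _ => false
  | k + 1, i, s =>
    if i * i * i > n then false
    else
      let s' := s.insert (i * i * i) 1
      if s'.contains (n - i * i * i) then true
      else cubesumLoop n k (i + 1) s'

def cubesum (n : Int) : Bool :=
  cubesumLoop n n.toNat 1 PySem.Dict.empty

-- ===== PORT B =====
-- first while loop of Source B: b := largest b ≥ 0 with (b+1)^3 ≤ n failing, via fuel ≥ #steps
def icbrtLoop (n : Int) : Nat → Int → Int
  | 0, b => b
  | k + 1, b => if (b + 1) ^ 3 ≤ n then icbrtLoop n k (b + 1) else b

-- second while loop of Source B: two pointers a ≤ b, fuel ≥ #steps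
def tpLoop (n : Int) : Nat → Int → Int → Bool
  | 0, _, _ => false
  | k + 1, a, b =>
    if a ≤ b then
      let t := a * a * a + b * b * b
      if t = n then true
      else if t < n then tpLoop n k (a + 1) b
      else tpLoop n k a (b - 1)
    else false

def cubesum_alt (n : Int) : Bool :=
  let b := icbrtLoop n n.toNat 0
  tpLoop n b.toNat 1 b

-- ===== PRECONDITION & SPEC =====
def Spec_cubesum (n : Int) (out : Bool) : Prop := out = cubesum_alt n
instance (n : Int) (out : Bool) : Decidable (Spec_cubesum n out) := by unfold Spec_cubesum; infer_instance

-- ===== CLAIM (what is proved, stated in full; the proofs are below) =====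
def Claim_equal_cubesum : Prop := ∀ (n : Int), Dom_cubesum n → Spec_cubesum n (cubesum n)

-- ===== LEMMAS AND PROOFS =====

theorem cube_le_cube {a b : Int} (h : a ≤ b) : a * a * a ≤ b * b * b := by
  nlinarith [sq_nonneg (a + b), sq_nonneg (a - b), sq_nonneg a, sq_nonneg b]

theorem le_cube {b : Int} (h : 1 ≤ b) : b ≤ b * b * b := by nlinarith

-- the common characterisation: n is a sum of two positive cubes
def Sol (n : Int) : Prop :=
  ∃ a b : Int, 1 ≤ a ∧ a ≤ b ∧ a * a * a + b * b * b = n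

theorem loopA_iff (n : Int) : ∀ (k : Nat) (i : Int) (s : PySem.Dict Int Int), 1 ≤ i →
    (n + 1 - i).toNat = k →
    (∀ x, s.contains x = true ↔ ∃ j : Int, 1 ≤ j ∧ j < i ∧ j * j * j = x) →
    (cubesumLoop n k i s = true ↔
      ∃ a b : Int, 1 ≤ a ∧ a ≤ b ∧ i ≤ b ∧ a * a * a + b * b * b = n) := by
  intro k
  induction k with
  | zero =>
    intro i s hi hk hs
    have hge : n + 1 ≤ i := by omega
    simp only [cubesumLoop]
    constructor
    · intro h; exact absurd h (by simp)
    · rintro ⟨a, b, ha, hab, hib, hsum⟩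
      have h1 : 1 ≤ a * a * a := cube_le_cube ha
      have hb1 : 1 ≤ b := le_trans ha hab
      have h2 : b ≤ b * b * b := le_cube hb1
      omega
  | succ k ih =>
    intro i s hi hk hs
    have hlt : i < n + 1 := by omega
    simp only [cubesumLoop]
    by_cases hbreak : i * i * i > n
    · simp only [if_pos hbreak]
      constructor
      · intro h; exact absurd h (by simp)
      · rintro ⟨a, b, ha, hab, hib, hsum⟩
        have h1 : 1 ≤ a * a * a := cube_le_cube ha
        have h2 : i * i * i ≤ b * b * b := cube_le_cube hib
        omega
    · simp only [if_neg hbreak]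
      have hs' : ∀ x, (s.insert (i * i * i) (1 : Int)).contains x = true ↔
          ∃ j : Int, 1 ≤ j ∧ j < i + 1 ∧ j * j * j = x := by
        intro x
        rw [PySem.Dict.contains_insert]
        constructor
        · intro h
          rcases Bool.or_eq_true_iff.mp h with h | h
          · have hx : x = i * i * i := beq_iff_eq.mp h
            exact ⟨i, hi, by omega, hx.symm⟩
          · rcases (hs x).mp h with ⟨j, hj1, hj2, hj3⟩
            exact ⟨j, hj1, by omega, hj3⟩
        · rintro ⟨j, hj1, hj2, hj3⟩
          by_cases hji : j = i
          · subst hji; subst hj3; simp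
          · have : j < i := by omega
            exact Bool.or_eq_true_iff.mpr (Or.inr ((hs x).mpr ⟨j, hj1, this, hj3⟩))
      by_cases hmem : (s.insert (i * i * i) (1 : Int)).contains (n - i * i * i) = true
      · simp only [hmem, if_true]
        constructor
        · intro _
          rcases (hs' _).mp hmem with ⟨j, hj1, hj2, hj3⟩
          exact ⟨j, i, hj1, by omega, le_refl i, by omega⟩
        · intro _; trivial
      · rw [if_neg hmem]
        rw [ih (i + 1) _ (by omega) (by omega) hs']
        constructor
        · rintro ⟨a, b, ha, hab, hib, hsum⟩
          exact ⟨a, b, ha, hab, by omega, hsum⟩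
        · rintro ⟨a, b, ha, hab, hib, hsum⟩
          by_cases hbi : b = i
          · subst hbi
            exact absurd ((hs' _).mpr ⟨a, ha, by omega, by omega⟩) hmem
          · exact ⟨a, b, ha, hab, by omega, hsum⟩

theorem cubesumA_iff (n : Int) : cubesum n = true ↔ Sol n := by
  unfold cubesum Sol
  by_cases hn : n ≤ 0
  · have h0 : n.toNat = 0 := by omega
    rw [h0]
    simp only [cubesumLoop]
    constructor
    · intro h; exact absurd h (by simp)
    · rintro ⟨a, b, ha, hab, hsum⟩
      have h1 : 1 ≤ a * a * a := cube_le_cube ha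
      have h2 : 1 ≤ b * b * b := cube_le_cube (le_trans ha hab)
      omega
  · rw [show n.toNat = (n + 1 - 1).toNat by omega]
    rw [loopA_iff n (n + 1 - 1).toNat 1 PySem.Dict.empty le_rfl rfl
      (by intro x; simp [PySem.Dict.contains_empty]; intro j h1 h2; omega)]
    constructor
    · rintro ⟨a, b, ha, hab, _, hsum⟩; exact ⟨a, b, ha, hab, hsum⟩
    · rintro ⟨a, b, ha, hab, hsum⟩; exact ⟨a, b, ha, hab, by omega, hsum⟩

theorem icbrtLoop_spec (n : Int) : ∀ (k : Nat) (b : Int), 0 ≤ b → b * b * b ≤ n →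
    n < (b + 1 + (k : Int)) * (b + 1 + (k : Int)) * (b + 1 + (k : Int)) →
    0 ≤ icbrtLoop n k b ∧
      (icbrtLoop n k b) * (icbrtLoop n k b) * (icbrtLoop n k b) ≤ n ∧
      n < (icbrtLoop n k b + 1) * (icbrtLoop n k b + 1) * (icbrtLoop n k b + 1) := by
  intro k
  induction k with
  | zero =>
    intro b hb hle hup
    simp only [icbrtLoop]
    refine ⟨hb, hle, ?_⟩
    simpa using hup
  | succ k ih =>
    intro b hb hle hup
    simp only [icbrtLoop]
    by_cases h : (b + 1) ^ 3 ≤ n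
    · rw [if_pos h]
      refine ih (b + 1) (by omega) (by nlinarith [h]) ?_
      have : (b + 1 + 1 + (k : Int)) = b + 1 + ((k : Nat) + 1 : Int) := by ring
      rw [this]
      have hc : ((k : Nat) + 1 : Int) = ((k + 1 : Nat) : Int) := by push_cast; ring
      rw [hc]; exact hup
    · rw [if_neg h]
      refine ⟨hb, hle, ?_⟩
      nlinarith [not_le.mp h]

theorem tpLoop_iff (n : Int) : ∀ (k : Nat) (a b : Int), (b - a + 1).toNat ≤ k →
    (tpLoop n k a b = true ↔
      ∃ x y : Int, a ≤ x ∧ x ≤ y ∧ y ≤ b ∧ x * x * x + y * y * y = n) := by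
  intro k
  induction k with
  | zero =>
    intro a b hk
    simp only [tpLoop]
    constructor
    · intro h; exact absurd h (by simp)
    · rintro ⟨x, y, h1, h2, h3, _⟩; omega
  | succ k ih =>
    intro a b hk
    simp only [tpLoop]
    by_cases hab : a ≤ b
    · rw [if_pos hab]
      by_cases heq : a * a * a + b * b * b = n
      · rw [if_pos heq]
        exact ⟨fun _ => ⟨a, b, le_rfl, hab, le_rfl, heq⟩, fun _ => rfl⟩
      · rw [if_neg heq]
        by_cases hlt : a * a * a + b * b * b < n
        · rw [if_pos hlt, ih (a + 1) b (by omega)]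
          constructor
          · rintro ⟨x, y, h1, h2, h3, h4⟩
            exact ⟨x, y, by omega, h2, h3, h4⟩
          · rintro ⟨x, y, h1, h2, h3, h4⟩
            by_cases hxa : x = a
            · subst hxa
              have : y * y * y ≤ b * b * b := cube_le_cube h3
              omega
            · exact ⟨x, y, by omega, h2, h3, h4⟩
        · rw [if_neg hlt, ih a (b - 1) (by omega)]
          constructor
          · rintro ⟨x, y, h1, h2, h3, h4⟩
            exact ⟨x, y, h1, h2, by omega, h4⟩
          · rintro ⟨x, y, h1, h2, h3, h4⟩
            by_cases hyb : y = b
            · subst hyb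
              have : a * a * a ≤ x * x * x := cube_le_cube h1
              omega
            · exact ⟨x, y, h1, h2, by omega, h4⟩
    · rw [if_neg hab]
      constructor
      · intro h; exact absurd h (by simp)
      · rintro ⟨x, y, h1, h2, h3, _⟩; omega

theorem cubesumB_iff (n : Int) : cubesum_alt n = true ↔ Sol n := by
  unfold cubesum_alt Sol
  by_cases hn : n < 0
  · have h0 : n.toNat = 0 := by omega
    rw [h0]
    simp only [icbrtLoop, Int.toNat_zero, tpLoop]
    constructor
    · intro h; exact absurd h (by simp)
    · rintro ⟨a, b, ha, hab, hsum⟩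
      have h1 : 1 ≤ a * a * a := cube_le_cube ha
      have h2 : 1 ≤ b * b * b := cube_le_cube (le_trans ha hab)
      omega
  · replace hn : 0 ≤ n := by omega
    have hcast : ((n.toNat : Int)) = n := Int.toNat_of_nonneg hn
    have hup : n < (0 + 1 + (n.toNat : Int)) * (0 + 1 + (n.toNat : Int)) * (0 + 1 + (n.toNat : Int)) := by
      rw [hcast]
      nlinarith [le_cube (show (1 : Int) ≤ n + 1 by omega)]
    obtain ⟨hc0, hcle, hcup⟩ := icbrtLoop_spec n n.toNat 0 le_rfl (by simpa using hn) hup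
    set c := icbrtLoop n n.toNat 0 with hc
    rw [tpLoop_iff n c.toNat 1 c (by omega)]
    constructor
    · rintro ⟨x, y, h1, h2, h3, h4⟩; exact ⟨x, y, h1, h2, h4⟩
    · rintro ⟨a, b, ha, hab, hsum⟩
      refine ⟨a, b, ha, hab, ?_, hsum⟩
      by_contra hbc
      have : (c + 1) * (c + 1) * (c + 1) ≤ b * b * b := cube_le_cube (by omega)
      have h1 : 1 ≤ a * a * a := cube_le_cube ha
      omega

-- ===== VERDICT (by name: the statement is the Claim_ definition above) =====
theorem cubesum_spec : Claim_equal_cubesum := by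
  intro n _
  unfold Spec_cubesum
  have hA := cubesumA_iff n
  have hB := cubesumB_iff n
  cases hA' : cubesum n <;> cases hB' : cubesum_alt n <;> simp_all
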